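-- pv_equiv track=rewrite | github.com/ash-ag/sentence-validation | src/__init__.py | is_sentence_valid
-- ===== SOURCE A (Python) =====
-- def is_sentence_valid(sentence):
--
-- 	# Constant to define numbers below rule #5
-- 	NUMBER_BELOW_RULE = 13
--
-- 	# Calculate the length of the string.
-- 	length = len(sentence)
--
-- 	# Check if empty sentence, it's invalid per rule #1 & #3
-- 	if length < 1:
-- 		return False
--
-- 	# Check for #1 rule
-- 	# 1. String starts with a capital letter.
-- 	if sentence[0] < 'A' or sentence[0] > 'Z':
-- 		return False
--
-- 	# Check for #3 rule
-- 	# 3. String ends with one of the following sentence termination characters: ".", "?", "!"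
-- 	if sentence[length-1] not in ['.', '?','!']:
-- 		return False
--
-- 	# Keep the index to the next character in the string.
-- 	index = 1
--
-- 	# counter for double quotation marks
-- 	doubleQuoteMarkCounter = 0
--
-- 	# Loop to go over the string.
-- 	while(index < length):
-- 		if sentence[index] in ["\"", "“", "”"]:
-- 			doubleQuoteMarkCounter += 1
-- 			index += 1
--
-- 		# Check for #4 rule
-- 		# 4. String has no period characters other than the last character.
-- 		elif sentence[index] == "." and index != length-1:
-- 			return False
--
-- 		# Check for #5 rule
-- 		# 5. Numbers below 13 are spelled out (”one”, “two”, "three”, etc…).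
-- 		elif sentence[index].isnumeric():
-- 			numberStr = sentence[index]
-- 			index += 1
-- 			while index < length and sentence[index].isnumeric():
-- 				numberStr += sentence[index]
-- 				index += 1
-- 			numberToCheck = int(numberStr)
-- 			if numberToCheck < NUMBER_BELOW_RULE:
-- 				return False
-- 		else:
-- 			index += 1
--
-- 	# Check for #2 rule
-- 	# 2. String has an even number of quotation marks.
-- 	if doubleQuoteMarkCounter%2 != 0:
-- 		return False
--
-- 	return True
-- ===== SOURCE B (Python) =====
-- def is_sentence_valid(sentence):
--     # guards: non-empty, capital start, terminator end
--     if not sentence: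
--         return False
--     if not ('A' <= sentence[0] <= 'Z'):
--         return False
--     if sentence[-1] not in '.?!':
--         return False
--     # rule 4: no period anywhere except the last character
--     if '.' in sentence[:-1]:
--         return False
--     # rule 2: even number of quotation marks
--     if (sentence.count('"') + sentence.count('\u201c') + sentence.count('\u201d')) % 2 != 0:
--         return False
--     # rule 5: every maximal digit run spells a number >= 13
--     val = 0
--     in_run = False
--     for ch in sentence:
--         if '0' <= ch <= '9':
--             val = val * 10 + (ord(ch) - 48)
--             in_run = True
--         elif in_run:
--             if val < 13:
--                 return False
--             val = 0
--             in_run = False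
--     if in_run and val < 13:
--         return False
--     return True
-- ===== Notes on version B (the rewrite author's own statement) =====
-- stated objective: simpler
-- what changed: Replaces A's manual index-driven while-loop (with an inner number-collecting sub-loop and a running quote counter) by a sequence of whole-string checks: substring test for a mid-string period, count() for quote parity, and a single fold that accumulates each maximal digit run's value numerically instead of building a substring and calling int().
import Mathlib
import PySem

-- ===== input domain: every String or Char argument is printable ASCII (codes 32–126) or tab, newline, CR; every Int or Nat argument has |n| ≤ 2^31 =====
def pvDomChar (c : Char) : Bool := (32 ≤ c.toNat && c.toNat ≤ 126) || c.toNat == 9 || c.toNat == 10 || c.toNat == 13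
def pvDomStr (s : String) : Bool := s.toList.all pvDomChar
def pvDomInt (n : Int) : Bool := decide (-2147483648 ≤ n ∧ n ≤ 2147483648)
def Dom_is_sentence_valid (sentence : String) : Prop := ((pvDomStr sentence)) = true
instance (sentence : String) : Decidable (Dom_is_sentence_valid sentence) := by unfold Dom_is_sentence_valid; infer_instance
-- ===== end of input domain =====

-- B replaces A's index-driven while-loop by whole-string checks (mid-string period, quote
-- parity via count) plus one fold that accumulates each maximal digit run's value numerically.

-- ===== PORT A =====

-- int(numberStr), hand-ported for this call site: numberStr is a nonempty run of characters
-- that each passed str.isnumeric, and on the printable-ASCII input domain those are exactly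
-- '0'..'9', where int() returns the decimal value (exact there).
def pvIntOfDigits (cs : List Char) : Int :=
  cs.foldl (fun v c => v * 10 + ((c.toNat : Int) - 48)) 0

-- the inner `while index < length and sentence[index].isnumeric()` loop: collects the digit
-- run into numberStr and returns the remaining suffix (str.isnumeric = Chars.isdigit on the
-- printable-ASCII domain, exact there)
def isvNumLoop (rest : List Char) (numberStr : List Char) : List Char × List Char :=
  match rest with
  | [] => (numberStr, [])
  | c :: t =>
      if PySem.Chars.isdigit c then isvNumLoop t (numberStr ++ [c]) else (numberStr, c :: t)

theorem isvNumLoop_snd_len (rest numberStr : List Char) :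
    (isvNumLoop rest numberStr).2.length ≤ rest.length := by
  induction rest generalizing numberStr with
  | nil => simp [isvNumLoop]
  | cons c t ih =>
      simp only [isvNumLoop]
      split
      · exact le_trans (ih _) (by simp)
      · simp

-- the outer `while index < length` loop of A over the suffix starting at index 1; the
-- remaining suffix plays the role of `index` (c is sentence[index]; t = [] iff index = length-1)
def isvLoop (rest : List Char) (doubleQuoteMarkCounter : Nat) : Bool :=
  match rest with
  | [] => doubleQuoteMarkCounter % 2 == 0
  | c :: t =>
      if c = '"' ∨ c = '“' ∨ c = '”' then isvLoop t (doubleQuoteMarkCounter + 1)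
      else if c = '.' ∧ t ≠ [] then false
      else if PySem.Chars.isdigit c then
        let r := isvNumLoop t [c]
        if pvIntOfDigits r.1 < 13 then false else isvLoop r.2 doubleQuoteMarkCounter
      else isvLoop t doubleQuoteMarkCounter
termination_by rest.length
decreasing_by
  · simp
  · simp only [List.length_cons]
    exact Nat.lt_succ_of_le (isvNumLoop_snd_len t [c])
  · simp

def is_sentence_valid (sentence : String) : Bool :=
  match sentence.toList with
  | [] => false            -- length < 1
  | c0 :: t =>
      if c0 < 'A' ∨ 'Z' < c0 then false
      else if ¬ ((c0 :: t).getLastD ' ' ∈ ['.', '?', '!']) then false   -- sentence[length-1]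
      else isvLoop t 0

-- ===== PORT B =====

-- the `for ch in sentence` loop of B: state (val, in_run)
def isvRuns (cs : List Char) (val : Int) (inRun : Bool) : Bool :=
  match cs with
  | [] => !(inRun && decide (val < 13))
  | c :: t =>
      if PySem.Chars.isdigit c then   -- '0' <= ch <= '9'
        isvRuns t (val * 10 + ((c.toNat : Int) - 48)) true   -- ord(ch) - 48
      else if inRun then
        (if val < 13 then false else isvRuns t 0 false)
      else isvRuns t val false

def is_sentence_valid_alt (sentence : String) : Bool :=
  match sentence.toList with
  | [] => false
  | c0 :: t =>
      if ¬ ('A' ≤ c0 ∧ c0 ≤ 'Z') then false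
      else if ¬ ((c0 :: t).getLastD ' ' ∈ ['.', '?', '!']) then false     -- sentence[-1]
      else if (c0 :: t).dropLast.contains '.' then false                  -- '.' in sentence[:-1]
      else if ((c0 :: t).count '"' + (c0 :: t).count '“' + (c0 :: t).count '”') % 2 ≠ 0 then false
      else isvRuns (c0 :: t) 0 false

-- ===== PRECONDITION & SPEC =====
def Spec_is_sentence_valid (sentence : String) (out : Bool) : Prop := out = is_sentence_valid_alt sentence
instance (sentence : String) (out : Bool) : Decidable (Spec_is_sentence_valid sentence out) := by unfold Spec_is_sentence_valid; infer_instance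

-- ===== CLAIM (what is proved, stated in full; the proofs are below) =====
def Claim_equal_is_sentence_valid : Prop := ∀ (sentence : String), Dom_is_sentence_valid sentence → Spec_is_sentence_valid sentence (is_sentence_valid sentence)

-- ===== LEMMAS AND PROOFS =====

-- isvNumLoop splits off the maximal digit prefix
theorem isvNumLoop_eq (rest acc : List Char) :
    isvNumLoop rest acc = (acc ++ rest.takeWhile PySem.Chars.isdigit,
                           rest.dropWhile PySem.Chars.isdigit) := by
  induction rest generalizing acc with
  | nil => simp [isvNumLoop]
  | cons c t ih =>
      simp only [isvNumLoop]
      by_cases h : PySem.Chars.isdigit c = true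
      · simp [h, ih]
      · simp [h]

-- B's fold across a digit run
theorem isvRuns_digits (ds : List Char) (hds : ∀ c ∈ ds, PySem.Chars.isdigit c = true)
    (rest : List Char) (hrest : ∀ r ∈ rest.head?, PySem.Chars.isdigit r = false)
    (v : Int) :
    isvRuns (ds ++ rest) v true =
      (if ds.foldl (fun a c => a * 10 + ((c.toNat : Int) - 48)) v < 13 then false
       else isvRuns rest 0 false) := by
  induction ds generalizing v with
  | nil =>
      cases rest with
      | nil => by_cases hv : v < 13 <;> simp [isvRuns, hv]
      | cons r t =>
          have hr : PySem.Chars.isdigit r = false := hrest r (by simp)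
          simp [isvRuns, hr]
  | cons d ds ih =>
      have hd : PySem.Chars.isdigit d = true := hds d (by simp)
      simp only [List.cons_append, isvRuns, hd, if_true, List.foldl_cons]
      exact ih (fun c hc => hds c (by simp [hc])) _

-- digit characters are neither '.' nor quotes
theorem digit_ne (c : Char) (h : PySem.Chars.isdigit c = true) :
    c ≠ '.' ∧ c ≠ '"' ∧ c ≠ '“' ∧ c ≠ '”' := by
  refine ⟨?_, ?_, ?_, ?_⟩ <;> (rintro rfl; exact absurd h (by decide))

-- dropping a leading digit block does not affect the mid-string-period test
theorem dropLast_contains_digits (ds rest : List Char)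
    (hds : ∀ c ∈ ds, PySem.Chars.isdigit c = true) :
    ((ds ++ rest).dropLast.contains '.') = (rest.dropLast.contains '.') := by
  induction ds with
  | nil => rfl
  | cons c ds ih =>
      have hc : c ≠ '.' := (digit_ne c (hds c (by simp))).1
      have ih' := ih (fun x hx => hds x (by simp [hx]))
      cases hz : ds ++ rest with
      | nil =>
          rcases List.append_eq_nil_iff.mp hz with ⟨h1, h2⟩
          subst h1; subst h2; simp
      | cons y ys =>
          rw [List.cons_append, hz, List.dropLast_cons₂, ← hz, List.contains_cons]
          have hcc : ('.' == c) = false := beq_eq_false_iff_ne.mpr (Ne.symm hc)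
          simp only [hcc, Bool.false_or]
          simpa using ih' 

-- the main loop invariant: A's loop equals B's three independent checks
theorem isvLoop_eq (n : Nat) : ∀ (t : List Char), t.length ≤ n →
    (∀ c ∈ t, pvDomChar c = true) → ∀ (q : Nat),
    isvLoop t q =
      (!(t.dropLast.contains '.') && ((q + t.count '"') % 2 == 0) && isvRuns t 0 false) := by
  induction n with
  | zero =>
      intro t ht _ q
      have : t = [] := List.eq_nil_of_length_eq_zero (Nat.le_zero.mp ht)
      subst this
      simp [isvLoop, isvRuns]
  | succ n ih =>
      intro t ht hdom q
      match t with
      | [] => simp [isvLoop, isvRuns]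
      | c :: t' =>
        have hdomc : pvDomChar c = true := hdom c (by simp)
        have hdom' : ∀ x ∈ t', pvDomChar x = true := fun x hx => hdom x (by simp [hx])
        have ht' : t'.length ≤ n := by simpa using ht
        rw [isvLoop]
        by_cases h1 : c = '"' ∨ c = '“' ∨ c = '”'
        · -- quote branch; on the domain the curly quotes are impossible
          have hc : c = '"' := by
            rcases h1 with h | h | h
            · exact h
            · subst h; exact absurd hdomc (by decide)
            · subst h; exact absurd hdomc (by decide)
          subst hc
          have hqd : PySem.Chars.isdigit '"' = false := by decide
          rw [if_pos (Or.inl rfl)]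
          cases t' with
          | nil => simp [isvLoop, isvRuns, hqd]
          | cons y ys =>
              rw [ih (y :: ys) ht' hdom' (q + 1)]
              have hq : q + 1 + (y :: ys).count '"' = q + ('"' :: y :: ys).count '"' := by
                simp [List.count_cons]; omega
              rw [List.dropLast_cons₂, List.contains_cons]
              simp only [hq]
              have : isvRuns ('"' :: y :: ys) 0 false = isvRuns (y :: ys) 0 false := by
                rw [isvRuns, if_neg (by simp [hqd]), if_neg (by simp)]
              rw [this]
              simp
        · rw [if_neg h1]
          by_cases h2 : c = '.' ∧ t' ≠ []
          · rw [if_pos h2]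
            obtain ⟨rfl, ht'ne⟩ := h2
            cases t' with
            | nil => exact absurd rfl ht'ne
            | cons y ys =>
              rw [List.dropLast_cons₂, List.contains_cons]
              simp
          · rw [if_neg h2]
            by_cases h3 : PySem.Chars.isdigit c = true
            · rw [if_pos h3]
              rw [isvNumLoop_eq]
              set ds := t'.takeWhile PySem.Chars.isdigit with hds_def
              set rest := t'.dropWhile PySem.Chars.isdigit with hrest_def
              have hsplit : ds ++ rest = t' := List.takeWhile_append_dropWhile
              have hdsdig : ∀ x ∈ ds, PySem.Chars.isdigit x = true :=
                fun x hx => List.mem_takeWhile_imp hx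
              have hcds : ∀ x ∈ c :: ds, PySem.Chars.isdigit x = true := by
                intro x hx
                rcases List.mem_cons.mp hx with rfl | hx
                · exact h3
                · exact hdsdig x hx
              have hrest : ∀ r ∈ rest.head?, PySem.Chars.isdigit r = false := by
                intro r hr
                have hh := List.head?_dropWhile_not PySem.Chars.isdigit t'
                rw [← hrest_def] at hh
                cases hx : rest.head? <;> rw [hx] at hh hr <;> simp_all
              have hrestlen : rest.length ≤ n :=
                le_trans (List.length_dropWhile_le _ _) ht'
              have hrestdom : ∀ x ∈ rest, pvDomChar x = true := by
                intro x hx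
                exact hdom' x (by rw [← hsplit]; exact List.mem_append_right _ hx)
              -- rewrite B's three checks across the digit run
              have hdrop : ((c :: t').dropLast.contains '.') = (rest.dropLast.contains '.') := by
                rw [← hsplit, ← List.cons_append]
                exact dropLast_contains_digits (c :: ds) rest hcds
              have hcount : (c :: t').count '"' = rest.count '"' := by
                rw [← hsplit, ← List.cons_append, List.count_append]
                have : (c :: ds).count '"' = 0 := by
                  rw [List.count_eq_zero]
                  intro hmem
                  exact (digit_ne '"' (hcds '"' hmem)).2.1 rfl
                omega
              have hfold : pvIntOfDigits ([c] ++ ds) =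
                  List.foldl (fun a c => a * 10 + ((c.toNat : Int) - 48))
                    (0 * 10 + ((c.toNat : Int) - 48)) ds := by
                simp [pvIntOfDigits]
              have hruns : isvRuns (c :: t') 0 false =
                  (if pvIntOfDigits ([c] ++ ds) < 13 then false else isvRuns rest 0 false) := by
                rw [isvRuns, if_pos h3, ← hsplit, isvRuns_digits ds hdsdig rest hrest, hfold]
              rw [hdrop, hcount, hruns]
              by_cases hval : pvIntOfDigits ([c] ++ ds) < 13
              · rw [if_pos hval, if_pos hval]
                simp
              · rw [if_neg hval, if_neg hval]
                exact ih rest hrestlen hrestdom q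
            · rw [if_neg h3]
              cases t' with
              | nil =>
                  have hcq : (c == '"') = false :=
                    beq_eq_false_iff_ne.mpr (fun h => h1 (Or.inl h))
                  simp [isvLoop, isvRuns, h3, List.count_cons, hcq]
              | cons y ys =>
                  have hcdot : c ≠ '.' := fun h => h2 ⟨h, by simp⟩
                  have hcq : c ≠ '"' := fun h => h1 (Or.inl h)
                  rw [ih (y :: ys) ht' hdom' q]
                  rw [List.dropLast_cons₂, List.contains_cons]
                  have h4 : isvRuns (c :: y :: ys) 0 false = isvRuns (y :: ys) 0 false := by
                    simp [isvRuns, h3]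
                  rw [h4]
                  have hcc : ('.' == c) = false := beq_eq_false_iff_ne.mpr (Ne.symm hcdot)
                  have hcnt : (c :: y :: ys).count '"' = (y :: ys).count '"' := by
                    simp [List.count_cons, hcq]
                  rw [hcnt, hcc]
                  simp

theorem is_sentence_valid_eq (sentence : String) (h : Dom_is_sentence_valid sentence) :
    is_sentence_valid sentence = is_sentence_valid_alt sentence := by
  have hdom : ∀ c ∈ sentence.toList, pvDomChar c = true := by
    have h' := h
    unfold Dom_is_sentence_valid pvDomStr at h'
    simpa [List.all_eq_true] using h'
  unfold is_sentence_valid is_sentence_valid_alt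
  rcases hs : sentence.toList with _ | ⟨c0, t⟩
  · rfl
  · rw [hs] at hdom
    simp only []
    have hdomt : ∀ x ∈ t, pvDomChar x = true := fun x hx => hdom x (by simp [hx])
    by_cases hg1 : c0 < 'A' ∨ 'Z' < c0
    · rw [if_pos hg1, if_pos (by rcases hg1 with h | h
                                 · exact fun hx => absurd hx.1 (not_le.mpr h)
                                 · exact fun hx => absurd hx.2 (not_le.mpr h))]
    · have hg1' : 'A' ≤ c0 ∧ c0 ≤ 'Z' := by
        rcases not_or.mp hg1 with ⟨ha, hb⟩
        exact ⟨not_lt.mp ha, not_lt.mp hb⟩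
      rw [if_neg hg1, if_neg (not_not_intro hg1')]
      by_cases hg2 : (c0 :: t).getLastD ' ' ∈ ['.', '?', '!']
      · rw [if_neg (not_not_intro hg2), if_neg (not_not_intro hg2)]
        have ht : t ≠ [] := by
          intro h0
          subst h0
          simp [List.getLastD] at hg2
          rcases hg2 with rfl | rfl | rfl
          · exact absurd hg1'.1 (by decide)
          · exact absurd hg1'.1 (by decide)
          · exact absurd hg1'.1 (by decide)
        have hc0dot : c0 ≠ '.' := fun e => absurd hg1'.1 (by rw [e]; decide)
        have hc0q : c0 ≠ '"' := fun e => absurd hg1'.1 (by rw [e]; decide)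
        have hnd : PySem.Chars.isdigit c0 = false := by
          simp [PySem.Chars.isdigit]
          intro _
          exact lt_of_lt_of_le (by decide) hg1'.1
        have hB1 : (c0 :: t).dropLast.contains '.' = t.dropLast.contains '.' := by
          cases t with
          | nil => exact absurd rfl ht
          | cons y ys =>
              rw [List.dropLast_cons₂, List.contains_cons]
              simp [beq_eq_false_iff_ne.mpr (Ne.symm hc0dot)]
        have hB2 : (c0 :: t).count '"' = t.count '"' := by
          simp [hc0q]
        have hB3 : (c0 :: t).count '“' = 0 := by
          rw [List.count_eq_zero]
          intro hmem
          exact absurd (hdom '“' hmem) (by decide)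
        have hB4 : (c0 :: t).count '”' = 0 := by
          rw [List.count_eq_zero]
          intro hmem
          exact absurd (hdom '”' hmem) (by decide)
        have hB5 : isvRuns (c0 :: t) 0 false = isvRuns t 0 false := by
          rw [isvRuns, if_neg (by simp [hnd]), if_neg (by simp)]
        rw [hB1, hB2, hB3, hB4, hB5, isvLoop_eq t.length t le_rfl hdomt 0]
        by_cases hdot : '.' ∈ t.dropLast
        · simp [hdot]
        · by_cases hpar : t.count '"' % 2 = 0 <;>
            simp [hdot, hpar]
      · rw [if_pos hg2, if_pos hg2]

-- ===== VERDICT (by name: the statement is the Claim_ definition above) =====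
theorem is_sentence_valid_spec : Claim_equal_is_sentence_valid := by
  intro s h
  unfold Spec_is_sentence_valid
  exact is_sentence_valid_eq s h
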